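-- pv_equiv track=rewrite | github.com/teruokun/apworld-packaging-tools | packages/island-version/src/island_version/compare.py | _parse_prerelease_part
-- ===== SOURCE A (Python) =====
-- _PRERELEASE_ORDER = {
--     "alpha": 0,
--     "a": 0,
--     "beta": 1,
--     "b": 1,
--     "rc": 2,
--     "c": 2,
--     "preview": 0,
--     "pre": 0,
-- }
--
-- def _parse_prerelease_part(part: str) -> tuple[int, int]:
--     """Parse a single pre-release identifier part.
--
--     Returns a tuple of (type_order, numeric_value) for comparison.
--     Type order determines alpha < beta < rc ordering.
--     Numeric value handles alpha.1 < alpha.2.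
--     """
--     # Try to parse as pure number
--     if part.isdigit():
--         return (3, int(part))  # Numbers sort after named pre-releases
--
--     # Check for named pre-release types
--     part_lower = part.lower()
--     for prefix, order in _PRERELEASE_ORDER.items():
--         if part_lower == prefix:
--             return (order, 0)
--         if part_lower.startswith(prefix):
--             # Handle cases like "alpha1" without separator
--             suffix = part_lower[len(prefix) :]
--             if suffix.isdigit():
--                 return (order, int(suffix))
--
--     # Unknown identifier - sort alphabetically after known types
--     return (4, 0)
-- ===== SOURCE B (Python) =====
-- _PRERELEASE_ORDER = {
--     "alpha": 0,
--     "a": 0,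
--     "beta": 1,
--     "b": 1,
--     "rc": 2,
--     "c": 2,
--     "preview": 0,
--     "pre": 0,
-- }
--
--
-- def _parse_prerelease_part(part: str) -> tuple[int, int]:
--     """Split off the maximal trailing digit run, then do one dict lookup."""
--     if part.isdigit():
--         return (3, int(part))
--     s = part.lower()
--     i = len(s)
--     while i > 0 and s[i - 1].isdigit():
--         i -= 1
--     head, tail = s[:i], s[i:]
--     order = _PRERELEASE_ORDER.get(head)
--     if order is None:
--         return (4, 0)
--     return (order, int(tail) if tail else 0)
-- ===== Notes on version B (the rewrite author's own statement) =====
-- stated objective: simpler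
-- what changed: Instead of scanning all eight dict prefixes with a startswith+suffix test per entry, B splits off the maximal trailing digit run once and does a single _PRERELEASE_ORDER.get(head) lookup.
import Mathlib
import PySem

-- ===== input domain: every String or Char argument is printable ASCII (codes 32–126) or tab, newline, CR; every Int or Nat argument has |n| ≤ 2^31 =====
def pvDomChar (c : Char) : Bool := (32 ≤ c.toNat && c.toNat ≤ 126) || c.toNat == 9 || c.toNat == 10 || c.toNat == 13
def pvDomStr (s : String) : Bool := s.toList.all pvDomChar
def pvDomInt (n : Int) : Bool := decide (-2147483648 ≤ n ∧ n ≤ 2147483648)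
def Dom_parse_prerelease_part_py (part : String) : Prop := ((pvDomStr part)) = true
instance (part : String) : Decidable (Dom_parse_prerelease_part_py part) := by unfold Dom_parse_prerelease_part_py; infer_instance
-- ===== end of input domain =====

-- B replaces A's scan over all eight dict prefixes by one split of the maximal trailing
-- digit run followed by a single dict lookup (objective: simpler).

-- ===== PORT A =====
-- _PRERELEASE_ORDER.items(), in insertion order
def pvKeys : List (List Char × Int) :=
  [("alpha".toList, 0), ("a".toList, 0), ("beta".toList, 1), ("b".toList, 1),
   ("rc".toList, 2), ("c".toList, 2), ("preview".toList, 0), ("pre".toList, 0)]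

-- the 'for prefix, order in _PRERELEASE_ORDER.items():' loop with its early returns
def pvALoop : List (List Char × Int) → List Char → Int × Int
  | [], _ => (4, 0)
  | (k, o) :: rest, pl =>
      if pl = k then (o, 0)
      else if PySem.Chars.startswith pl k then
        -- suffix = part_lower[len(prefix):]
        let suffix := PySem.Chars.slice pl (some (k.length : Int)) none
        if PySem.Chars.strIsdigit suffix then (o, (PySem.Int.ofChars? suffix).getD 0)
        else pvALoop rest pl
      else pvALoop rest pl

def parse_prerelease_part_py (part : String) : Int × Int :=
  if PySem.Str.strIsdigit part then
    (3, (PySem.Int.ofStr? part).getD 0)  -- isdigit guard guarantees int() returns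
  else
    pvALoop pvKeys (PySem.Chars.lower part.toList)

-- ===== PORT B =====
def pvOrderDict : PySem.Dict (List Char) Int :=
  PySem.Dict.mk
    [("alpha".toList, 0), ("a".toList, 0), ("beta".toList, 1), ("b".toList, 1),
     ("rc".toList, 2), ("c".toList, 2), ("preview".toList, 0), ("pre".toList, 0)]

def parse_prerelease_part_py_alt (part : String) : Int × Int :=
  if PySem.Str.strIsdigit part then
    (3, (PySem.Int.ofStr? part).getD 0)
  else
    let s := PySem.Chars.lower part.toList
    -- the while loop scanning trailing digit chars from the end, then s[:i], s[i:]: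
    -- exact, since it computes precisely the maximal digit suffix and the rest
    let tail := (s.reverse.takeWhile PySem.Chars.isdigit).reverse
    let head := (s.reverse.dropWhile PySem.Chars.isdigit).reverse
    match pvOrderDict.get? head with
    | none => (4, 0)
    | some o => (o, if tail.isEmpty then 0 else (PySem.Int.ofChars? tail).getD 0)

-- ===== PRECONDITION & SPEC =====
def Spec_parse_prerelease_part_py (part : String) (out : Int × Int) : Prop := out = parse_prerelease_part_py_alt part
instance (part : String) (out : Int × Int) : Decidable (Spec_parse_prerelease_part_py part out) := by unfold Spec_parse_prerelease_part_py; infer_instance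

-- ===== CLAIM (what is proved, stated in full; the proofs are below) =====
def Claim_equal_parse_prerelease_part_py : Prop := ∀ (part : String), Dom_parse_prerelease_part_py part → Spec_parse_prerelease_part_py part (parse_prerelease_part_py part)

-- ===== LEMMAS AND PROOFS =====

-- a prerelease key: nonempty, ends in a non-digit character
def pvGoodKey (k : List Char) : Bool :=
  match k.reverse with
  | [] => false
  | c :: _ => !PySem.Chars.isdigit c

theorem pv_dw {α : Type} (p : α → Bool) (xs ys : List α) (h : xs.all p = true) :
    (xs ++ ys).dropWhile p = ys.dropWhile p := by
  induction xs with
  | nil => simp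
  | cons a l ih => simp_all [List.dropWhile_cons]

theorem pv_split (k d : List Char) (c : Char) (kr : List Char)
    (hrev : k.reverse = c :: kr) (hc : PySem.Chars.isdigit c = false)
    (hd : d.all PySem.Chars.isdigit = true) :
    (k ++ d).reverse.dropWhile PySem.Chars.isdigit = k.reverse := by
  have hd' : d.reverse.all PySem.Chars.isdigit = true := by simpa using hd
  rw [List.reverse_append, pv_dw _ _ _ hd', hrev, List.dropWhile_cons, hc]
  simp

theorem pv_step_miss (k : List Char) (o : Int) (rest : List (List Char × Int)) (pl : List Char)
    (hk : pvGoodKey k = true)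
    (hh : pl.reverse.dropWhile PySem.Chars.isdigit ≠ k.reverse) :
    pvALoop ((k, o) :: rest) pl = pvALoop rest pl := by
  cases hrev : k.reverse with
  | nil => rw [pvGoodKey, hrev] at hk; simp at hk
  | cons c kr =>
    rw [pvGoodKey, hrev] at hk
    have hc : PySem.Chars.isdigit c = false := by simpa using hk
    have hne : pl ≠ k := by
      intro e; apply hh
      have : pl = k ++ [] := by simp [e]
      rw [this]; exact pv_split k [] c kr hrev hc (by simp)
    simp only [pvALoop]
    rw [if_neg hne]
    by_cases hpre : PySem.Chars.startswith pl k = true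
    · rw [if_pos hpre]
      obtain ⟨d, hdpl⟩ := (PySem.Chars.startswith_iff pl k).mp hpre
      have hsuf : PySem.Chars.slice pl (some (k.length : Int)) none = d := by
        rw [PySem.Chars.slice_eq_listSlice, PySem.List.slice_from pl (by positivity)]
        rw [← hdpl]; simp [List.drop_left]
      rw [hsuf]
      have hnd : PySem.Chars.strIsdigit d = false := by
        by_contra hcon
        have hdig : PySem.Chars.strIsdigit d = true := by
          cases h' : PySem.Chars.strIsdigit d <;> simp_all
        have hall : d.all PySem.Chars.isdigit = true := by
          simp [PySem.Chars.strIsdigit, List.all_eq_true] at hdig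
          simpa [List.all_eq_true] using hdig.2
        exact hh (by rw [← hdpl]; exact pv_split k d c kr hrev hc hall)
      rw [hnd]; simp
    · rw [if_neg hpre]

theorem pv_step_hit (k : List Char) (o : Int) (rest : List (List Char × Int)) (pl : List Char)
    (hk : pvGoodKey k = true)
    (hh : pl.reverse.dropWhile PySem.Chars.isdigit = k.reverse) :
    pvALoop ((k, o) :: rest) pl =
      (o, if ((pl.reverse.takeWhile PySem.Chars.isdigit).reverse).isEmpty then 0
          else (PySem.Int.ofChars? ((pl.reverse.takeWhile PySem.Chars.isdigit).reverse)).getD 0) := by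
  have hsplit : pl.reverse.takeWhile PySem.Chars.isdigit ++ k.reverse = pl.reverse := by
    rw [← hh]; exact List.takeWhile_append_dropWhile
  have hpl : pl = k ++ (pl.reverse.takeWhile PySem.Chars.isdigit).reverse := by
    have := congrArg List.reverse hsplit
    simpa [List.reverse_append] using this.symm
  have ht : (pl.reverse.takeWhile PySem.Chars.isdigit).all PySem.Chars.isdigit = true :=
    List.all_takeWhile
  cases htE : pl.reverse.takeWhile PySem.Chars.isdigit with
  | nil =>
    have hplk : pl = k := by rw [hpl, htE]; simp
    simp only [pvALoop]
    rw [if_pos hplk]; simp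
  | cons c ts =>
    have hne : pl ≠ k := by
      intro e
      have : pl.length = k.length + (c :: ts).length := by
        rw [hpl, htE]; simp
      rw [e] at this; simp at this
    have hpre : PySem.Chars.startswith pl k = true :=
      (PySem.Chars.startswith_iff pl k).mpr ⟨(pl.reverse.takeWhile PySem.Chars.isdigit).reverse, hpl.symm⟩
    simp only [pvALoop]
    rw [if_neg hne, if_pos hpre]
    have hsuf : PySem.Chars.slice pl (some (k.length : Int)) none =
        (pl.reverse.takeWhile PySem.Chars.isdigit).reverse := by
      rw [PySem.Chars.slice_eq_listSlice, PySem.List.slice_from pl (by positivity)]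
      conv_lhs => rw [hpl]
      simp [List.drop_left]
    rw [hsuf]
    have hdig : PySem.Chars.strIsdigit ((pl.reverse.takeWhile PySem.Chars.isdigit).reverse) = true := by
      simp [PySem.Chars.strIsdigit, htE, List.all_reverse, List.all_eq_true]
      have := ht; rw [htE] at this; simp [List.all_eq_true] at this; tauto
    rw [hdig]
    rw [htE]
    simp

theorem pv_head_eq (pl k : List Char)
    (h : (pl.reverse.dropWhile PySem.Chars.isdigit).reverse = k) :
    pl.reverse.dropWhile PySem.Chars.isdigit = k.reverse := by
  rw [← h, List.reverse_reverse]

theorem pv_head_ne (pl k : List Char)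
    (h : (pl.reverse.dropWhile PySem.Chars.isdigit).reverse ≠ k) :
    pl.reverse.dropWhile PySem.Chars.isdigit ≠ k.reverse := by
  intro e; exact h (by rw [e, List.reverse_reverse])

theorem pv_main (pl : List Char) :
    pvALoop pvKeys pl =
      (match pvOrderDict.get? ((pl.reverse.dropWhile PySem.Chars.isdigit).reverse) with
       | none => (4, 0)
       | some o => (o, if ((pl.reverse.takeWhile PySem.Chars.isdigit).reverse).isEmpty then 0
                       else (PySem.Int.ofChars? ((pl.reverse.takeWhile PySem.Chars.isdigit).reverse)).getD 0)) := by
  simp only [pvKeys]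
  by_cases h1 : (pl.reverse.dropWhile PySem.Chars.isdigit).reverse = "alpha".toList
  · rw [pv_step_hit _ _ _ _ (by decide) (pv_head_eq _ _ h1), h1]
    simp [pvOrderDict, PySem.Dict.get?_mk_cons]
  by_cases h2 : (pl.reverse.dropWhile PySem.Chars.isdigit).reverse = "a".toList
  · rw [pv_step_miss _ _ _ _ (by decide) (pv_head_ne _ _ h1),
        pv_step_hit _ _ _ _ (by decide) (pv_head_eq _ _ h2), h2]
    simp [pvOrderDict, PySem.Dict.get?_mk_cons]
  by_cases h3 : (pl.reverse.dropWhile PySem.Chars.isdigit).reverse = "beta".toList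
  · rw [pv_step_miss _ _ _ _ (by decide) (pv_head_ne _ _ h1),
        pv_step_miss _ _ _ _ (by decide) (pv_head_ne _ _ h2),
        pv_step_hit _ _ _ _ (by decide) (pv_head_eq _ _ h3), h3]
    simp [pvOrderDict, PySem.Dict.get?_mk_cons]
  by_cases h4 : (pl.reverse.dropWhile PySem.Chars.isdigit).reverse = "b".toList
  · rw [pv_step_miss _ _ _ _ (by decide) (pv_head_ne _ _ h1),
        pv_step_miss _ _ _ _ (by decide) (pv_head_ne _ _ h2),
        pv_step_miss _ _ _ _ (by decide) (pv_head_ne _ _ h3),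
        pv_step_hit _ _ _ _ (by decide) (pv_head_eq _ _ h4), h4]
    simp [pvOrderDict, PySem.Dict.get?_mk_cons]
  by_cases h5 : (pl.reverse.dropWhile PySem.Chars.isdigit).reverse = "rc".toList
  · rw [pv_step_miss _ _ _ _ (by decide) (pv_head_ne _ _ h1),
        pv_step_miss _ _ _ _ (by decide) (pv_head_ne _ _ h2),
        pv_step_miss _ _ _ _ (by decide) (pv_head_ne _ _ h3),
        pv_step_miss _ _ _ _ (by decide) (pv_head_ne _ _ h4),
        pv_step_hit _ _ _ _ (by decide) (pv_head_eq _ _ h5), h5]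
    simp [pvOrderDict, PySem.Dict.get?_mk_cons]
  by_cases h6 : (pl.reverse.dropWhile PySem.Chars.isdigit).reverse = "c".toList
  · rw [pv_step_miss _ _ _ _ (by decide) (pv_head_ne _ _ h1),
        pv_step_miss _ _ _ _ (by decide) (pv_head_ne _ _ h2),
        pv_step_miss _ _ _ _ (by decide) (pv_head_ne _ _ h3),
        pv_step_miss _ _ _ _ (by decide) (pv_head_ne _ _ h4),
        pv_step_miss _ _ _ _ (by decide) (pv_head_ne _ _ h5),
        pv_step_hit _ _ _ _ (by decide) (pv_head_eq _ _ h6), h6]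
    simp [pvOrderDict, PySem.Dict.get?_mk_cons]
  by_cases h7 : (pl.reverse.dropWhile PySem.Chars.isdigit).reverse = "preview".toList
  · rw [pv_step_miss _ _ _ _ (by decide) (pv_head_ne _ _ h1),
        pv_step_miss _ _ _ _ (by decide) (pv_head_ne _ _ h2),
        pv_step_miss _ _ _ _ (by decide) (pv_head_ne _ _ h3),
        pv_step_miss _ _ _ _ (by decide) (pv_head_ne _ _ h4),
        pv_step_miss _ _ _ _ (by decide) (pv_head_ne _ _ h5),
        pv_step_miss _ _ _ _ (by decide) (pv_head_ne _ _ h6),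
        pv_step_hit _ _ _ _ (by decide) (pv_head_eq _ _ h7), h7]
    simp [pvOrderDict, PySem.Dict.get?_mk_cons]
  by_cases h8 : (pl.reverse.dropWhile PySem.Chars.isdigit).reverse = "pre".toList
  · rw [pv_step_miss _ _ _ _ (by decide) (pv_head_ne _ _ h1),
        pv_step_miss _ _ _ _ (by decide) (pv_head_ne _ _ h2),
        pv_step_miss _ _ _ _ (by decide) (pv_head_ne _ _ h3),
        pv_step_miss _ _ _ _ (by decide) (pv_head_ne _ _ h4),
        pv_step_miss _ _ _ _ (by decide) (pv_head_ne _ _ h5),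
        pv_step_miss _ _ _ _ (by decide) (pv_head_ne _ _ h6),
        pv_step_miss _ _ _ _ (by decide) (pv_head_ne _ _ h7),
        pv_step_hit _ _ _ _ (by decide) (pv_head_eq _ _ h8), h8]
    simp [pvOrderDict, PySem.Dict.get?_mk_cons]
  rw [pv_step_miss _ _ _ _ (by decide) (pv_head_ne _ _ h1),
      pv_step_miss _ _ _ _ (by decide) (pv_head_ne _ _ h2),
      pv_step_miss _ _ _ _ (by decide) (pv_head_ne _ _ h3),
      pv_step_miss _ _ _ _ (by decide) (pv_head_ne _ _ h4),
      pv_step_miss _ _ _ _ (by decide) (pv_head_ne _ _ h5),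
      pv_step_miss _ _ _ _ (by decide) (pv_head_ne _ _ h6),
      pv_step_miss _ _ _ _ (by decide) (pv_head_ne _ _ h7),
      pv_step_miss _ _ _ _ (by decide) (pv_head_ne _ _ h8)]
  have e1 : ((['a', 'l', 'p', 'h', 'a'] : List Char) == (pl.reverse.dropWhile PySem.Chars.isdigit).reverse) = false := beq_eq_false_iff_ne.mpr (fun e => h1 e.symm)
  have e2 : ((['a'] : List Char) == (pl.reverse.dropWhile PySem.Chars.isdigit).reverse) = false := beq_eq_false_iff_ne.mpr (fun e => h2 e.symm)
  have e3 : ((['b', 'e', 't', 'a'] : List Char) == (pl.reverse.dropWhile PySem.Chars.isdigit).reverse) = false := beq_eq_false_iff_ne.mpr (fun e => h3 e.symm)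
  have e4 : ((['b'] : List Char) == (pl.reverse.dropWhile PySem.Chars.isdigit).reverse) = false := beq_eq_false_iff_ne.mpr (fun e => h4 e.symm)
  have e5 : ((['r', 'c'] : List Char) == (pl.reverse.dropWhile PySem.Chars.isdigit).reverse) = false := beq_eq_false_iff_ne.mpr (fun e => h5 e.symm)
  have e6 : ((['c'] : List Char) == (pl.reverse.dropWhile PySem.Chars.isdigit).reverse) = false := beq_eq_false_iff_ne.mpr (fun e => h6 e.symm)
  have e7 : ((['p', 'r', 'e', 'v', 'i', 'e', 'w'] : List Char) == (pl.reverse.dropWhile PySem.Chars.isdigit).reverse) = false := beq_eq_false_iff_ne.mpr (fun e => h7 e.symm)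
  have e8 : ((['p', 'r', 'e'] : List Char) == (pl.reverse.dropWhile PySem.Chars.isdigit).reverse) = false := beq_eq_false_iff_ne.mpr (fun e => h8 e.symm)
  simp [pvOrderDict, PySem.Dict.get?, List.find?_cons, e1, e2, e3, e4, e5, e6, e7, e8, pvALoop]

-- ===== VERDICT (by name: the statement is the Claim_ definition above) =====
theorem parse_prerelease_part_py_spec : Claim_equal_parse_prerelease_part_py := by
  intro part _
  unfold Spec_parse_prerelease_part_py parse_prerelease_part_py parse_prerelease_part_py_alt
  by_cases hg : PySem.Str.strIsdigit part = true
  · rw [if_pos hg, if_pos hg]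
  · rw [if_neg hg, if_neg hg]
    exact pv_main (PySem.Chars.lower part.toList)
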